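-- pv_equiv track=rewrite | github.com/matthewelse/british-informatics-olympiad | 2018/q2.py | generate_second_dial
-- ===== SOURCE A (Python) =====
-- def generate_second_dial(n):
--     letters = set()
--     ring = list('ABCDEFGHIJKLMNOPQRSTUVWXYZ')
--     result = []
--     position = 0
--
--     while len(ring) > 0:
--         position += n - 1
--         position %= len(ring)
--
--         moved = ring[position]
--         ring.remove(moved)
--         result.append(moved)
--
--     return result
-- ===== SOURCE B (Python) =====
-- def generate_second_dial(n):
--     def go(ring):
--         if not ring:
--             return []
--         k = (n - 1) % len(ring)
--         return [ring[k]] + go(ring[k + 1:] + ring[:k])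
--     return go(list('ABCDEFGHIJKLMNOPQRSTUVWXYZ'))
-- ===== Notes on version B (the rewrite author's own statement) =====
-- stated objective: alternative
-- what changed: A iterates with an accumulated cursor index and deletes by value with list.remove; B is a recursive rotation formulation with no cursor and no accumulator: it always selects ring[(n-1) % len(ring)] and recurses on the rotated remainder ring[k+1:] + ring[:k], consing the results front-to-back.
import Mathlib
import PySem

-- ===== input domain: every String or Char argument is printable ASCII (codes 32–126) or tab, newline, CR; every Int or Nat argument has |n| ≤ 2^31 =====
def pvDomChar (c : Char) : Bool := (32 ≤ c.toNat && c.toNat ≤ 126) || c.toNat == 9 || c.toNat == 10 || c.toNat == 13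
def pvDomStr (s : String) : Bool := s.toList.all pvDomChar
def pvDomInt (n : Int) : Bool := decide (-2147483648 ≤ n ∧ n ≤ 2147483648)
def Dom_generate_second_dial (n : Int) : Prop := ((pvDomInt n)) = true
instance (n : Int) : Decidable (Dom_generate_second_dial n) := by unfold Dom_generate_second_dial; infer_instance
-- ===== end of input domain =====

-- B replaces A's while-loop with an accumulated cursor index and list.remove by a
-- recursive rotation formulation with no cursor, no accumulator and no value search;
-- equivalence of return values is proved below.

-- ===== PORT A =====
def pvLetters : List String :=
  "ABCDEFGHIJKLMNOPQRSTUVWXYZ".toList.map (fun c => String.ofList [c])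

-- the while loop of A; fuel 26 = initial ring size, one unit per removal
def pvGoA (n : Int) : Nat → List String → Int → List String → List String
  | 0, _, _, result => result
  | fuel + 1, ring, position, result =>
    if ring.length = 0 then result
    else
      let position' := PySem.Int.mod (position + (n - 1)) (ring.length : Int)
      match PySem.List.pyGet? ring position' with
      | none => result            -- unreachable: 0 ≤ position' < len(ring)
      | some moved =>
        match PySem.List.remove? ring moved with
        | none => result          -- unreachable: moved ∈ ring
        | some ring' => pvGoA n fuel ring' position' (result ++ [moved])

def generate_second_dial (n : Int) : List String :=
  pvGoA n 26 pvLetters 0 []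

-- ===== PORT B =====
-- Source B's inner recursive go: since len(ring) > 0, Python's (n-1) % len(ring) equals
-- Int.emod and lies in [0, len), so ring[k] is the in-range index k (exact here).
def pvGoB (n : Int) (ring : List String) : List String :=
  if he : ring = [] then []
  else
    have hlen : 0 < ring.length := List.length_pos_iff.mpr he
    let k : Nat := ((n - 1) % (ring.length : Int)).toNat
    have hk : k < ring.length := by
      have h1 : (0 : Int) < (ring.length : Int) := by exact_mod_cast hlen
      have := Int.emod_lt_of_pos (n - 1) h1
      have := Int.emod_nonneg (n - 1) (by omega : (ring.length : Int) ≠ 0)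
      omega
    ring[k] :: pvGoB n (ring.drop (k + 1) ++ ring.take k)
termination_by ring.length
decreasing_by simp; omega

def generate_second_dial_alt (n : Int) : List String :=
  pvGoB n pvLetters

-- ===== PRECONDITION & SPEC =====
def Spec_generate_second_dial (n : Int) (out : List String) : Prop := out = generate_second_dial_alt n
instance (n : Int) (out : List String) : Decidable (Spec_generate_second_dial n out) := by unfold Spec_generate_second_dial; infer_instance

-- ===== CLAIM (what is proved, stated in full; the proofs are below) =====
def Claim_equal_generate_second_dial : Prop := ∀ (n : Int), Dom_generate_second_dial n → Spec_generate_second_dial n (generate_second_dial n)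

-- ===== LEMMAS AND PROOFS =====

-- dropping past k and re-appending the prefix = erase index k, then rotate the cursor to k
theorem pvRotStep {α : Type} (l : List α) (k : Nat) (hk : k < l.length) :
    l.drop (k + 1) ++ l.take k = (l.eraseIdx k).rotate k := by
  have htk : (l.take k).length = k := by simp; omega
  rw [List.eraseIdx_eq_take_drop_succ,
      List.rotate_eq_drop_append_take (by simp; omega),
      List.drop_append, List.take_append, htk]
  simp [List.take_take]

-- a suffix of the prefix followed by the tail is a suffix of the whole list
theorem pvDropSplit {α : Type} (l : List α) (q m : Nat) (hm : m ≤ q) (hq : q ≤ l.length) :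
    (l.take q).drop m ++ l.drop q = l.drop m := by
  conv_rhs => rw [← List.take_append_drop q l]
  rw [List.drop_append, List.length_take, show min q l.length = q by omega,
      show m - q = 0 by omega, List.drop_zero]

-- the rotated ring steps to the rotated erased ring
theorem pvStep {α : Type} (l : List α) (p k : Nat) (hk : k < l.length) :
    (l.rotate p).drop (k + 1) ++ (l.rotate p).take k
      = (l.eraseIdx ((k + p) % l.length)).rotate ((k + p) % l.length) := by
  have hL : 0 < l.length := by omega
  obtain ⟨q, hq, hrot, hmod⟩ :
      ∃ q, q < l.length ∧ l.rotate p = l.rotate q ∧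
        (k + p) % l.length = (k + q) % l.length := by
    refine ⟨p % l.length, Nat.mod_lt _ hL, (List.rotate_mod l p).symm, ?_⟩
    conv_lhs => rw [Nat.add_mod]
    conv_rhs => rw [Nat.add_mod, Nat.mod_mod_of_dvd p (dvd_refl _)]
  rw [hrot, hmod]
  have hjL : (k + q) % l.length < l.length := Nat.mod_lt _ hL
  rw [← pvRotStep l _ hjL, List.rotate_eq_drop_append_take (le_of_lt hq)]
  have htq : (l.take q).length = q := by simp; omega
  have hdq : (l.drop q).length = l.length - q := by simp
  rw [List.drop_append, List.take_append, hdq]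
  by_cases hc : k + q < l.length
  · have hjv : (k + q) % l.length = k + q := Nat.mod_eq_of_lt hc
    have h1 : k + 1 - (l.length - q) = 0 := by omega
    have h2 : k - (l.length - q) = 0 := by omega
    rw [hjv, h1, h2]
    simp only [List.drop_zero, List.take_zero, List.append_nil]
    rw [List.drop_drop, show q + (k + 1) = k + q + 1 by omega,
        show k + q = q + k by omega, List.take_add, List.append_assoc]
  · have hjv : (k + q) % l.length = k + q - l.length := by
      rw [Nat.mod_eq_sub_mod (by omega), Nat.mod_eq_of_lt (by omega)]
    rw [hjv]
    have h0 : (l.drop q).drop (k + 1) = [] := List.drop_eq_nil_of_le (by simp; omega)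
    have h1 : (l.drop q).take k = l.drop q := List.take_of_length_le (by simp; omega)
    have h2 : k + 1 - (l.length - q) = (k + q - l.length) + 1 := by omega
    have h3 : k - (l.length - q) = k + q - l.length := by omega
    have h4 : (l.take q).take (k + q - l.length) = l.take (k + q - l.length) := by
      rw [List.take_take]; congr 1; omega
    rw [h0, h1, h2, h3, h4, List.nil_append,
        ← pvDropSplit l q (k + q - l.length + 1) (by omega) (by omega),
        List.append_assoc]

-- main invariant: A's loop from ring with cursor p produces res followed by
-- B's recursion on the ring rotated left by p (fuel covers the remaining ring)
theorem pvMain (n : Int) : ∀ (fuel : Nat) (ring : List String) (p : Int) (res : List String),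
    ring.Nodup → 0 ≤ p → ring.length ≤ fuel →
    pvGoA n fuel ring p res = res ++ pvGoB n (ring.rotate p.toNat) := by
  intro fuel
  induction fuel with
  | zero =>
    intro ring p res _ _ hf
    have : ring = [] := List.length_eq_zero_iff.mp (Nat.le_zero.mp hf)
    subst this
    simp [pvGoA, pvGoB]
  | succ fuel ih =>
    intro ring p res hnd hp hf
    by_cases hr : ring.length = 0
    · have : ring = [] := List.length_eq_zero_iff.mp hr
      subst this
      simp [pvGoA, pvGoB]
    · have hL : 0 < ring.length := Nat.pos_of_ne_zero hr
      have hLi : (0 : Int) < (ring.length : Int) := by exact_mod_cast hL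
      have hLne : (ring.length : Int) ≠ 0 := by omega
      -- A side
      have hmA : PySem.Int.mod (p + (n - 1)) (ring.length : Int)
          = (p + (n - 1)) % (ring.length : Int) := PySem.Int.mod_eq_emod_of_pos hLi
      set j : Int := (p + (n - 1)) % (ring.length : Int) with hjdef
      have hj0 : 0 ≤ j := Int.emod_nonneg _ hLne
      have hjlt : j < (ring.length : Int) := Int.emod_lt_of_pos _ hLi
      have hjn : j.toNat < ring.length := by omega
      have hgetA : PySem.List.pyGet? ring j = some ring[j.toNat] :=
        PySem.List.pyGet?_eq_some_getElem ring hj0 hjlt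
      have hremA : PySem.List.remove? ring ring[j.toNat]
          = some (ring.eraseIdx j.toNat) := by
        rw [PySem.List.remove?_eq_some_erase ring _ (List.getElem_mem hjn),
            hnd.erase_getElem j.toNat hjn]
      -- B side
      have hrotlen : (ring.rotate p.toNat).length = ring.length := List.length_rotate ring p.toNat
      have hne : ring.rotate p.toNat ≠ [] := by
        rw [← List.length_pos_iff, hrotlen]; exact hL
      set k : Nat := ((n - 1) % ((ring.rotate p.toNat).length : Int)).toNat with hkdef
      have hkv : k = ((n - 1) % (ring.length : Int)).toNat := by rw [hkdef, hrotlen]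
      have hk0 : (0 : Int) ≤ (n - 1) % (ring.length : Int) := Int.emod_nonneg _ hLne
      have hklt : (n - 1) % (ring.length : Int) < (ring.length : Int) := Int.emod_lt_of_pos _ hLi
      have hkn : k < ring.length := by omega
      have hidx : (k + p.toNat) % ring.length = j.toNat := by
        have h1 : (((k + p.toNat) % ring.length : Nat) : Int) = j := by
          push_cast [hkv, Int.toNat_of_nonneg hk0, Int.toNat_of_nonneg hp]
          rw [hjdef, Int.add_emod, Int.emod_emod_of_dvd _ (dvd_refl _),
              ← Int.add_emod, Int.add_comm]
        omega
      have hgetB : (ring.rotate p.toNat)[k]'(by omega) = ring[j.toNat] := by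
        simp only [List.getElem_rotate, hidx]
      have hnew : (ring.rotate p.toNat).drop (k + 1) ++ (ring.rotate p.toNat).take k
          = (ring.eraseIdx j.toNat).rotate j.toNat := by
        rw [pvStep ring p.toNat k hkn, hidx]
      -- unfold one B step
      have hB : pvGoB n (ring.rotate p.toNat)
          = ring[j.toNat] :: pvGoB n ((ring.eraseIdx j.toNat).rotate j.toNat) := by
        rw [pvGoB]
        simp only [dif_neg hne, ← hkdef, hgetB, hnew]
      -- assemble the step
      simp only [pvGoA, hmA, hgetA, hremA]
      rw [if_neg hr, hB,
          ih (ring.eraseIdx j.toNat) j (res ++ [ring[j.toNat]])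
            (hnd.sublist (List.eraseIdx_sublist ring j.toNat)) hj0
            (by rw [List.length_eraseIdx_of_lt hjn]; omega)]
      simp

-- ===== VERDICT (by name: the statement is the Claim_ definition above) =====
theorem generate_second_dial_spec : Claim_equal_generate_second_dial := by
  intro n _
  unfold Spec_generate_second_dial generate_second_dial generate_second_dial_alt
  have h := pvMain n 26 pvLetters 0 [] (by decide) le_rfl (by decide)
  simpa using h
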